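-- pv_equiv track=rewrite | github.com/Nalin-Angrish/The2020CoderBot | ext/_utils.py | allcases
-- ===== SOURCE A (Python) =====
-- def allcases(string):
--     n = len(string)
--     mx = 1 << n
--     inp = string.lower()
--     allcombs = []
--
--     for i in range(mx):
--         combination = [k for k in inp]
--         for j in range(n):
--             if (((i >> j) & 1) == 1):
--                 combination[j] = inp[j].upper()
--
--         temp = ""
--         for i in combination:
--             temp += i
--         allcombs.append(temp)
--     return allcombs
-- ===== SOURCE B (Python) =====
-- def allcases(string):
--     combos = [""]
--     for c in reversed(string.lower()):
--         combos = [x + t for t in combos for x in (c, c.upper())]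
--     return combos
-- ===== Notes on version B (the rewrite author's own statement) =====
-- stated objective: simpler
-- what changed: A enumerates all 2^n bit masks and for each rebuilds the char list position by position; B builds the combination list once by a structural recursion over the characters, extending the suffix combinations with the lowercase then uppercase head, so the bit arithmetic and the inner position loop disappear.
import Mathlib
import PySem

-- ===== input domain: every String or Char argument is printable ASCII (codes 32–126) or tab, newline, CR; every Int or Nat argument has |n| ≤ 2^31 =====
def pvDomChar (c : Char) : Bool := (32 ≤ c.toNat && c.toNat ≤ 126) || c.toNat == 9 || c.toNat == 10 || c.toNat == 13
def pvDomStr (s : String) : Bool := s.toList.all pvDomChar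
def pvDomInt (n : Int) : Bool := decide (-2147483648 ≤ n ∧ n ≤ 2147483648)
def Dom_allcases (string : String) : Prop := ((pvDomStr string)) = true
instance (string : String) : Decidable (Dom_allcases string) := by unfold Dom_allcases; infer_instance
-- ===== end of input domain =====

-- B replaces A's bit-mask double loop over range(2^n) by a structural recursion that
-- extends the combinations of the suffix with the lowercase/uppercase head (objective: simpler).

-- ===== PORT A =====
def allcases (string : String) : List String :=
  let n := (PySem.Str.len string).toNat
  let mx := 2 ^ n
  let inp := (PySem.Str.lower string).toList
  ((List.range mx).foldl (fun allcombs i =>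
    let combination := inp
    let combination := (List.range n).foldl (fun comb j =>
      if (i >>> j) &&& 1 == 1 then comb.set j (PySem.Chars.upperChar (inp.getD j ' ')) else comb)
      combination
    let temp := combination.foldl (fun t c => t.push c) ""
    temp :: allcombs) []).reverse

-- ===== PORT B =====
def allcasesAux : List Char → List String
  | [] => [""]
  | c :: rest => (allcasesAux rest).flatMap
      (fun t => [String.singleton c ++ t, String.singleton (PySem.Chars.upperChar c) ++ t])

def allcases_alt (string : String) : List String :=
  allcasesAux (PySem.Str.lower string).toList

-- ===== PRECONDITION & SPEC =====
def Spec_allcases (string : String) (out : List String) : Prop := out = allcases_alt string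
instance (string : String) (out : List String) : Decidable (Spec_allcases string out) := by unfold Spec_allcases; infer_instance

-- ===== CLAIM (what is proved, stated in full; the proofs are below) =====
def Claim_equal_allcases : Prop := ∀ (string : String), Dom_allcases string → Spec_allcases string (allcases string)

-- ===== LEMMAS AND PROOFS =====

-- A's inner loop body, named for the proofs
def stepF (l : List Char) (i : Nat) : List Char → Nat → List Char :=
  fun comb j => if (i >>> j) &&& 1 == 1 then comb.set j (PySem.Chars.upperChar (l.getD j ' ')) else comb

-- A's inner loop, written as the independent per-position recursion on the char list
def auxBits (i : Nat) : List Char → List Char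
  | [] => []
  | c :: r => (if i &&& 1 == 1 then PySem.Chars.upperChar c else c) :: auxBits (i >>> 1) r

theorem get?_auxBits (l : List Char) : ∀ (i j : Nat),
    (auxBits i l)[j]? =
      if (i >>> j) &&& 1 == 1 then (l[j]?).map PySem.Chars.upperChar else l[j]? := by
  induction l with
  | nil => intro i j; simp [auxBits]
  | cons c r ih =>
    intro i j
    cases j with
    | zero =>
      simp only [auxBits, List.getElem?_cons_zero, Nat.shiftRight_zero, Option.map_some]
      split <;> rfl
    | succ j =>
      have hsh : i >>> 1 >>> j = i >>> (j + 1) := by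
        rw [← Nat.shiftRight_add, Nat.add_comm]
      simp only [auxBits, List.getElem?_cons_succ, ih (i >>> 1) j, hsh]

theorem fold_len (l : List Char) (i : Nat) (ks : List Nat) (comb : List Char) :
    (ks.foldl (stepF l i) comb).length = comb.length := by
  induction ks generalizing comb with
  | nil => rfl
  | cons k ks ih => simp only [List.foldl_cons]; rw [ih]; unfold stepF; split <;> simp

theorem fold_get? (l : List Char) (i : Nat) (k : Nat) (j : Nat) :
    ((List.range k).foldl (stepF l i) l)[j]? =
    if j < k ∧ ((i >>> j) &&& 1 == 1) = true
      then (l[j]?).map PySem.Chars.upperChar else l[j]? := by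
  induction k with
  | zero => simp
  | succ k ih =>
    rw [List.range_succ, List.foldl_append, List.foldl_cons, List.foldl_nil]
    have hlen : ((List.range k).foldl (stepF l i) l).length = l.length := fold_len l i _ l
    by_cases hb : ((i >>> k) &&& 1 == 1) = true
    · have hb' : i >>> k % 2 = 1 := by simpa [Nat.and_one_is_mod] using hb
      have hst : stepF l i ((List.range k).foldl (stepF l i) l) k
          = ((List.range k).foldl (stepF l i) l).set k (PySem.Chars.upperChar (l.getD k ' ')) := by
        simp [stepF, hb']
      rw [hst, List.getElem?_set, hlen]
      by_cases hjk : k = j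
      · subst hjk
        rw [if_pos rfl]
        by_cases hl : k < l.length
        · rw [if_pos hl, if_pos ⟨Nat.lt_succ_self k, hb⟩,
              List.getElem?_eq_getElem hl, List.getD_eq_getElem l ' ' hl]
          rfl
        · rw [if_neg hl, if_pos ⟨Nat.lt_succ_self k, hb⟩,
              List.getElem?_eq_none (by omega)]
          rfl
      · rw [if_neg hjk, ih]
        have heq : (j < k + 1 ∧ ((i >>> j) &&& 1 == 1) = true) ↔
               (j < k ∧ ((i >>> j) &&& 1 == 1) = true) := by
          constructor
          · rintro ⟨h1, h2⟩; exact ⟨by omega, h2⟩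
          · rintro ⟨h1, h2⟩; exact ⟨by omega, h2⟩
        rw [if_congr heq rfl rfl]
    · have hb' : ¬ i >>> k % 2 = 1 := by simpa [Nat.and_one_is_mod] using hb
      have hst : stepF l i ((List.range k).foldl (stepF l i) l) k
          = (List.range k).foldl (stepF l i) l := by
        simp [stepF, hb']
      rw [hst, ih]
      by_cases hjk : j = k
      · subst hjk
        have hb'' : ¬ i >>> j % 2 = 1 := by simpa [Nat.and_one_is_mod] using hb
        simp [hb'']
      · have heq : (j < k + 1 ∧ ((i >>> j) &&& 1 == 1) = true) ↔
               (j < k ∧ ((i >>> j) &&& 1 == 1) = true) := by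
          constructor
          · rintro ⟨h1, h2⟩; exact ⟨by omega, h2⟩
          · rintro ⟨h1, h2⟩; exact ⟨by omega, h2⟩
        rw [if_congr heq rfl rfl]

theorem fold_eq_auxBits (l : List Char) (i : Nat) :
    (List.range l.length).foldl (stepF l i) l = auxBits i l := by
  apply List.ext_getElem?
  intro j
  rw [fold_get?, get?_auxBits]
  by_cases hl : j < l.length
  · have : (j < l.length ∧ ((i >>> j) &&& 1 == 1) = true) ↔ (((i >>> j) &&& 1 == 1) = true) := by
      constructor
      · exact fun h => h.2
      · exact fun h => ⟨hl, h⟩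
    rw [if_congr this rfl rfl]
  · have hn : l[j]? = none := List.getElem?_eq_none (by omega)
    rw [hn]
    simp

theorem toList_foldl_push : ∀ (cs : List Char) (s : String),
    (cs.foldl (fun t c => t.push c) s).toList = s.toList ++ cs := by
  intro cs
  induction cs with
  | nil => simp
  | cons c r ih => intro s; simp [ih]

theorem range_two_mul_map {α : Type} (g : Nat → α) : ∀ (m : Nat),
    (List.range (2*m)).map g = (List.range m).flatMap (fun q => [g (2*q), g (2*q+1)]) := by
  intro m
  induction m with
  | zero => rfl
  | succ m ih =>
    have h2 : 2 * (m+1) = (2*m + 1) + 1 := by ring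
    rw [h2, List.range_succ, List.range_succ, List.range_succ]
    simp only [List.map_append, List.flatMap_append, ih]
    simp

theorem map_ofList_auxBits : ∀ (l : List Char),
    (List.range (2 ^ l.length)).map (fun i => String.ofList (auxBits i l)) = allcasesAux l := by
  intro l
  induction l with
  | nil =>
    simp [allcasesAux, auxBits]
  | cons c r ih =>
    have hp : 2 ^ (c :: r).length = 2 * 2 ^ r.length := by
      simp [List.length_cons, pow_succ]; ring
    rw [hp, range_two_mul_map]
    have he : (fun q => [(fun i => String.ofList (auxBits i (c :: r))) (2*q),
                         (fun i => String.ofList (auxBits i (c :: r))) (2*q+1)])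
        = (fun q => (fun t => [String.singleton c ++ t,
                               String.singleton (PySem.Chars.upperChar c) ++ t])
            ((fun i => String.ofList (auxBits i r)) q)) := by
      funext q
      have hb0 : ((2*q) &&& 1 == 1) = false := by simp [Nat.and_one_is_mod]
      have hb1 : ((2*q+1) &&& 1 == 1) = true := by simp [Nat.and_one_is_mod]
      have hs0 : (2*q) >>> 1 = q := by simp [Nat.shiftRight_one]
      have hs1 : (2*q+1) >>> 1 = q := by simp [Nat.shiftRight_one]; omega
      simp only [auxBits, hb0, hb1, hs0, hs1, if_true, if_false, Bool.false_eq_true]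
      have h1 : String.ofList (c :: auxBits q r)
          = String.singleton c ++ String.ofList (auxBits q r) := by
        apply String.ext; simp
      have h2 : String.ofList (PySem.Chars.upperChar c :: auxBits q r)
          = String.singleton (PySem.Chars.upperChar c) ++ String.ofList (auxBits q r) := by
        apply String.ext; simp
      rw [h1, h2]
    rw [he,
        (List.flatMap_map (fun i => String.ofList (auxBits i r))
          (fun t => [String.singleton c ++ t, String.singleton (PySem.Chars.upperChar c) ++ t])
          (List.range (2 ^ r.length))).symm,
        ih]
    rfl

theorem foldl_cons_reverse {α β : Type} (f : α → β) : ∀ (xs : List α) (acc : List β),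
    (xs.foldl (fun a x => f x :: a) acc).reverse = acc.reverse ++ xs.map f := by
  intro xs
  induction xs with
  | nil => simp
  | cons x xs ih => intro acc; simp

theorem len_lower (s : String) : (PySem.Str.len s).toNat = (PySem.Str.lower s).toList.length := by
  simp [PySem.Str.len, PySem.Str.toList_lower, PySem.Chars.lower]

-- ===== VERDICT (by name: the statement is the Claim_ definition above) =====
theorem allcases_spec : Claim_equal_allcases := by
  intro string _
  unfold Spec_allcases allcases allcases_alt
  dsimp only
  rw [len_lower string]
  set l := (PySem.Str.lower string).toList with hl
  have hbody : ∀ i : Nat,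
      ((List.range l.length).foldl (stepF l i) l).foldl (fun t c => t.push c) "" =
      String.ofList (auxBits i l) := by
    intro i
    rw [fold_eq_auxBits]
    apply String.ext
    rw [toList_foldl_push]
    simp
  calc ((List.range (2 ^ l.length)).foldl
          (fun allcombs i =>
            (((List.range l.length).foldl (stepF l i) l).foldl (fun t c => t.push c) "") :: allcombs)
          []).reverse
      = ([] : List String).reverse ++ (List.range (2 ^ l.length)).map
          (fun i => ((List.range l.length).foldl (stepF l i) l).foldl (fun t c => t.push c) "") :=
        foldl_cons_reverse _ _ []
    _ = (List.range (2 ^ l.length)).map (fun i => String.ofList (auxBits i l)) := by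
        rw [List.reverse_nil, List.nil_append]
        exact List.map_congr_left (fun i _ => hbody i)
    _ = allcasesAux l := map_ofList_auxBits l
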